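-- pv_equiv track=rewrite | github.com/hotskiper/algorithm | codility/python/FrogRiverOne.py | solution
-- ===== SOURCE A (Python) =====
-- def solution(X, A):
--     # Implement your solution here
--     leaf_set= set()
--     for i in range(len(A)):
--         a = A[i]
--         if a <= X:
--             leaf_set.add(a)
--         if len(leaf_set) == X:
--             return i
--     return -1
-- ===== SOURCE B (Python) =====
-- def solution(X, A):
--     first = {}
--     for i, a in enumerate(A):
--         if a <= X and a not in first:
--             first[a] = i
--     idxs = list(first.values())
--     return idxs[X - 1] if len(idxs) >= X else -1
-- ===== Notes on version B (the rewrite author's own statement) =====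
-- stated objective: alternative
-- what changed: Replaces A's running set with a size-equality early-exit check at every step by one full pass recording each relevant value's first-appearance index in a dict, then indexing the list of those indices at position X-1.
-- outside the precondition, e.g. on solution(0, [1]): A returns 0, B raises IndexError; on solution(0, [-1]): A returns -1, B returns 0
import Mathlib
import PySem

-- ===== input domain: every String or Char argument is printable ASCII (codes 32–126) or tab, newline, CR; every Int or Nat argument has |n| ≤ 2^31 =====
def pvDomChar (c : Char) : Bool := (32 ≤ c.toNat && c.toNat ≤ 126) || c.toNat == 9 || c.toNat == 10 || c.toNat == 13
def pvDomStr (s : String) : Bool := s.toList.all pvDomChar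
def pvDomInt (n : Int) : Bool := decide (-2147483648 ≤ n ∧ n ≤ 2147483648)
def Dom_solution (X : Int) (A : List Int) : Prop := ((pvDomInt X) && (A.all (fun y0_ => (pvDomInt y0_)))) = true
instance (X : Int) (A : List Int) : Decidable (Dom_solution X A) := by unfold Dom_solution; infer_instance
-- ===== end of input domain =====

-- B records each value's first-appearance index in one full pass and indexes the resulting
-- index list at X-1, instead of A's running set with a size-equality early exit (objective: alternative).

-- ===== PORT A =====
def solGoA (X : Int) : List Int → Int → PySem.Set Int → Int
  | [], _, _ => -1
  | a :: rest, i, s =>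
    let s' := if a ≤ X then PySem.Set.add s a else s
    if PySem.Set.len s' = X then i else solGoA X rest (i + 1) s'

def solution (X : Int) (A : List Int) : Int :=
  solGoA X A 0 PySem.Set.empty

-- ===== PORT B =====
def solution_alt (X : Int) (A : List Int) : Int :=
  let first := (PySem.List.enumerate A).foldl
    (fun d p => if p.2 ≤ X ∧ d.contains p.2 = false then d.insert p.2 p.1 else d)
    PySem.Dict.empty
  let idxs := first.values
  if X ≤ (idxs.length : Int) then PySem.List.pyGetD idxs (X - 1) (-1) else -1

-- ===== PRECONDITION & SPEC =====
-- Pre_ restricts to the task's natural domain X ≥ 1 (Codility guarantees 1 ≤ X): for X ≤ 0 a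
-- "number of required leaves" is meaningless and A's value there (0 or -1 depending on whether
-- a nonpositive element precedes the first index) is an accident of its running set-size check,
-- while B's natural indexing raises or differs there.
def Pre_solution (X : Int) (A : List Int) : Prop := 1 ≤ X
instance (X : Int) (A : List Int) : Decidable (Pre_solution X A) := by unfold Pre_solution; infer_instance
def pvWitness_solution : Int × List Int := (3, [1, 3, 1, 4, 2, 3, 5, 4])

def Spec_solution (X : Int) (A : List Int) (out : Int) : Prop := out = solution_alt X A
instance (X : Int) (A : List Int) (out : Int) : Decidable (Spec_solution X A out) := by unfold Spec_solution; infer_instance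

-- ===== CLAIM (what is proved, stated in full; the proofs are below) =====
def Claim_equal_solution : Prop := ∀ (X : Int) (A : List Int), Dom_solution X A → Pre_solution X A → Spec_solution X A (solution X A)

-- ===== LEMMAS AND PROOFS =====

-- proof-only helper: the indices (counting from i) at which a new value ≤ X appears,
-- given the set s of values already seen.
def newIdx (X : Int) : List Int → Int → PySem.Set Int → List Int
  | [], _, _ => []
  | a :: rest, i, s =>
    if a ≤ X ∧ PySem.Set.contains s a = false then
      i :: newIdx X rest (i + 1) (PySem.Set.add s a)
    else
      newIdx X rest (i + 1) s

lemma newIdx_cons_new {X a : Int} {rest : List Int} {i : Int} {s : PySem.Set Int}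
    (h1 : a ≤ X) (h2 : PySem.Set.contains s a = false) :
    newIdx X (a :: rest) i s = i :: newIdx X rest (i + 1) (PySem.Set.add s a) := by
  simp only [newIdx]; rw [if_pos ⟨h1, h2⟩]

lemma newIdx_cons_skip {X a : Int} {rest : List Int} {i : Int} {s : PySem.Set Int}
    (h : ¬ (a ≤ X ∧ PySem.Set.contains s a = false)) :
    newIdx X (a :: rest) i s = newIdx X rest (i + 1) s := by
  simp only [newIdx]; rw [if_neg h]

lemma not_mem_of_contains_false {s : PySem.Set Int} {a : Int}
    (h : PySem.Set.contains s a = false) : a ∉ s := by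
  intro hm
  rw [(PySem.Set.contains_iff s a).mpr hm] at h
  exact Bool.noConfusion h

lemma len_add_of_contains_false {s : PySem.Set Int} {a : Int}
    (h : PySem.Set.contains s a = false) :
    PySem.Set.len (PySem.Set.add s a) = PySem.Set.len s + 1 := by
  rw [PySem.Set.add_of_not_mem (not_mem_of_contains_false h)]
  simp [PySem.Set.len]

lemma solGoA_eq_newIdx (X : Int) :
    ∀ (l : List Int) (i : Int) (s : PySem.Set Int) (k : Nat),
      X = PySem.Set.len s + k + 1 →
      solGoA X l i s = ((newIdx X l i s)[k]?).getD (-1) := by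
  intro l
  induction l with
  | nil => intro i s k hk; simp [solGoA, newIdx]
  | cons a rest ih =>
    intro i s k hk
    have hlenpos : (0 : Int) ≤ PySem.Set.len s := by simp [PySem.Set.len]
    simp only [solGoA]
    by_cases hle : a ≤ X
    · rw [if_pos hle]
      by_cases hc : PySem.Set.contains s a = false
      · have hlen := len_add_of_contains_false hc
        rw [newIdx_cons_new hle hc]
        cases k with
        | zero =>
          rw [if_pos (show PySem.Set.len (PySem.Set.add s a) = X by omega)]
          simp
        | succ k' =>
          rw [if_neg (show ¬ PySem.Set.len (PySem.Set.add s a) = X by omega)]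
          rw [ih (i + 1) (PySem.Set.add s a) k' (by omega)]
          simp
      · have hc' : PySem.Set.contains s a = true := by
          cases h : PySem.Set.contains s a
          · exact absurd h hc
          · rfl
        have hadd : PySem.Set.add s a = s :=
          PySem.Set.add_of_mem ((PySem.Set.contains_iff s a).mp hc')
        rw [hadd, newIdx_cons_skip (fun h => hc h.2)]
        rw [if_neg (show ¬ PySem.Set.len s = X by omega)]
        exact ih (i + 1) s k hk
    · rw [if_neg hle, newIdx_cons_skip (fun h => hle h.1)]
      rw [if_neg (show ¬ PySem.Set.len s = X by omega)]
      exact ih (i + 1) s k hk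

lemma foldB_values_eq_newIdx (X : Int) :
    ∀ (l : List Int) (i : Int) (s : PySem.Set Int) (d : PySem.Dict Int Int),
      (∀ a, d.contains a = PySem.Set.contains s a) →
      ((PySem.List.enumerate l i).foldl
          (fun d p => if p.2 ≤ X ∧ d.contains p.2 = false then d.insert p.2 p.1 else d)
          d).values = d.values ++ newIdx X l i s := by
  intro l
  induction l with
  | nil => intro i s d _; simp [PySem.List.enumerate_nil, newIdx]
  | cons a rest ih =>
    intro i s d hagree
    rw [PySem.List.enumerate_cons, List.foldl_cons]
    show ((PySem.List.enumerate rest (i + 1)).foldl _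
        (if a ≤ X ∧ d.contains a = false then d.insert a i else d)).values = _
    by_cases hle : a ≤ X
    · by_cases hc : PySem.Set.contains s a = false
      · have hdc : d.contains a = false := by rw [hagree]; exact hc
        rw [if_pos ⟨hle, hdc⟩]
        have hvals : (d.insert a i).values = d.values ++ [i] := by
          simp [PySem.Dict.values, PySem.Dict.items_insert_of_not_contains d (k := a) i hdc]
        have hagree' : ∀ b, (d.insert a i).contains b
            = PySem.Set.contains (PySem.Set.add s a) b := by
          intro b
          rw [PySem.Dict.contains_insert]
          cases hba : (b == a) with
          | true =>
            have hba' : b = a := by simpa using hba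
            subst hba'
            simp [PySem.Set.contains_eq_listContains, PySem.Set.mem_add]
          | false =>
            have hne : b ≠ a := by simpa using hba
            simp only [Bool.false_or]
            rw [hagree]
            simp [PySem.Set.contains_eq_listContains, PySem.Set.mem_add, hne]
        rw [ih (i + 1) (PySem.Set.add s a) (d.insert a i) hagree', hvals,
          newIdx_cons_new hle hc, List.append_assoc]
        rfl
      · have hdc : ¬ (d.contains a = false) := by rw [hagree]; exact hc
        rw [if_neg (fun h => hdc h.2), ih (i + 1) s d hagree,
          newIdx_cons_skip (fun h => hc h.2)]
    · rw [if_neg (fun h => hle h.1), ih (i + 1) s d hagree,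
        newIdx_cons_skip (fun h => hle h.1)]

-- ===== VERDICT (by name: the statement is the Claim_ definition above) =====
theorem solution_spec : Claim_equal_solution := by
  intro X A _ hpre
  have hx1 : (1 : Int) ≤ X := hpre
  unfold Spec_solution solution
  have hk : X = PySem.Set.len (PySem.Set.empty : PySem.Set Int) + (X - 1).toNat + 1 := by
    simp only [PySem.Set.len, PySem.Set.empty, List.length_nil, Nat.cast_zero]
    omega
  rw [solGoA_eq_newIdx X A 0 PySem.Set.empty (X - 1).toNat hk]
  have hagree : ∀ a : Int, (PySem.Dict.empty : PySem.Dict Int Int).contains a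
      = PySem.Set.contains (PySem.Set.empty : PySem.Set Int) a := by
    intro a; simp [PySem.Dict.contains_empty, PySem.Set.contains_eq_listContains, PySem.Set.empty]
  simp only [solution_alt,
    foldB_values_eq_newIdx X A 0 PySem.Set.empty PySem.Dict.empty hagree]
  have hvals : (PySem.Dict.empty : PySem.Dict Int Int).values = [] := rfl
  rw [hvals, List.nil_append]
  set t := newIdx X A 0 PySem.Set.empty with ht
  by_cases hlen : X ≤ (t.length : Int)
  · rw [if_pos hlen]
    rw [PySem.List.pyGetD_of_nonneg t (-1) (by omega)]
    rw [List.getD_eq_getElem?_getD]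
  · rw [if_neg hlen]
    have hge : t.length ≤ (X - 1).toNat := by omega
    rw [List.getElem?_eq_none hge]
    rfl
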